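-- pv_equiv track=rewrite | github.com/icefunicu/wechat-bot | tests/test_smoke.py | _build_synthetic_source
-- ===== SOURCE A (Python) =====
-- def _build_synthetic_source(expected_lines: set) -> str:
--     if not expected_lines:
--         return ""
--     max_line = max(expected_lines)
--     lines = []
--     for line_no in range(1, max_line + 1):
--         lines.append(f"__cov_line__ = {line_no}" if line_no in expected_lines else "")
--     return "\n".join(lines)
-- ===== SOURCE B (Python) =====
-- def _build_synthetic_source(expected_lines: set) -> str:
--     marked = sorted({ln for ln in expected_lines if ln >= 1})
--     out = []
--     prev = 1
--     for ln in marked: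
--         out.append("\n" * (ln - prev))
--         out.append(f"__cov_line__ = {ln}")
--         prev = ln
--     return "".join(out)
-- ===== Notes on version B (the rewrite author's own statement) =====
-- stated objective: alternative
-- what changed: B sorts the positive elements once and emits the output sparsely as gap-runs of newlines followed by marked lines, instead of A's dense loop over every line number 1..max with a membership test per line.
import Mathlib
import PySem

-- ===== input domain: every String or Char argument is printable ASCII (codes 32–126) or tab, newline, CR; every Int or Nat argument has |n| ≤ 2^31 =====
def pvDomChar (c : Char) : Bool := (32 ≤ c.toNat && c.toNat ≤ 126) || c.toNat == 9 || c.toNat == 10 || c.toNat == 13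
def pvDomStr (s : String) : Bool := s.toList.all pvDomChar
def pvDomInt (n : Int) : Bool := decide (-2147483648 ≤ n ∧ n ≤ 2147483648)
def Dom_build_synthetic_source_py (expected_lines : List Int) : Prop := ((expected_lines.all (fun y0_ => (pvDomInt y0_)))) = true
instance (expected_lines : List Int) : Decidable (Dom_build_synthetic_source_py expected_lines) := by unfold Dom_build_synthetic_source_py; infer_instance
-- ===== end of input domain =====

-- B sorts the positive elements once and emits the output sparsely as gap-runs of newlines
-- followed by marked lines, instead of A's dense per-line-number membership scan (objective: alternative).

-- f"__cov_line__ = {ln}" (shared literal helper of both ports)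
def covLine (ln : Int) : String := PySem.Str.join "" ["__cov_line__ = ", PySem.Int.toStr ln]

-- ===== PORT A =====
def build_synthetic_source_py (expected_lines : List Int) : String :=
  if expected_lines.isEmpty then ""
  else
    match PySem.List.max? expected_lines (fun x => x) with
    | none => ""   -- unreachable: the list is non-empty
    | some max_line =>
      let lines := (PySem.List.pyRange 1 (max_line + 1) 1).foldl
        (fun acc line_no =>
          acc ++ [if expected_lines.contains line_no then covLine line_no else ""]) []
      PySem.Str.join "\n" lines

-- ===== PORT B =====
-- the loop body of Source B: per sorted marked line, the gap-run "\n" * (ln - prev) and the marked text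
def gapChunks : List Int → Int → List String
  | [], _ => []
  | ln :: t, prev => String.ofList (List.replicate (ln - prev).toNat '\n') :: covLine ln :: gapChunks t ln

def build_synthetic_source_py_alt (expected_lines : List Int) : String :=
  PySem.Str.join ""
    (gapChunks
      (PySem.List.sorted (PySem.Set.ofList (expected_lines.filter (fun ln => decide (1 ≤ ln)))) (fun x => x))
      1)

-- ===== PRECONDITION & SPEC =====
def Spec_build_synthetic_source_py (expected_lines : List Int) (out : String) : Prop := out = build_synthetic_source_py_alt expected_lines
instance (expected_lines : List Int) (out : String) : Decidable (Spec_build_synthetic_source_py expected_lines out) := by unfold Spec_build_synthetic_source_py; infer_instance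

-- ===== CLAIM =====
def Claim_equal_build_synthetic_source_py : Prop := ∀ (expected_lines : List Int), Dom_build_synthetic_source_py expected_lines → Spec_build_synthetic_source_py expected_lines (build_synthetic_source_py expected_lines)

-- ===== LEMMAS AND PROOFS =====

-- in a strictly increasing list every element is at most the last one
theorem le_getLast_of_pairwise_lt : ∀ (L : List Int) (h : L ≠ []), L.Pairwise (· < ·) →
    ∀ x ∈ L, x ≤ L.getLast h := by
  intro L
  induction L with
  | nil => intro h; exact absurd rfl h
  | cons a t ih =>
      intro _ hp x hx
      cases t with
      | nil => simp at hx; simp [hx]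
      | cons b t' =>
          rw [List.getLast_cons (by simp)]
          rcases List.mem_cons.mp hx with rfl | hx'
          · have := (List.pairwise_cons.mp hp).1 _ (List.getLast_mem (l := b :: t') (by simp))
            omega
          · exact ih (by simp) (List.pairwise_cons.mp hp).2 x hx'

-- an ""-join concatenates chunk by chunk
theorem join_nil_cons (a : List Char) (rest : List (List Char)) :
    PySem.Chars.join [] (a :: rest) = a ++ PySem.Chars.join [] rest := by
  cases rest with
  | nil => simp [PySem.Chars.join_singleton, PySem.Chars.join_nil]
  | cons b t => rw [PySem.Chars.join_cons_cons]; simp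

-- peeling k empty lines and then the final line out of a "\n"-join
theorem joinNL_replicate_singleton (k : Nat) (x : List Char) :
    PySem.Chars.join ['\n'] (List.replicate k [] ++ [x]) = List.replicate k '\n' ++ x := by
  induction k with
  | zero => simp [PySem.Chars.join_singleton]
  | succ n ih =>
      have h2 : List.replicate (n + 1) ([] : List Char) ++ [x]
          = [] :: (List.replicate n ([] : List Char) ++ [x]) := by simp [List.replicate_succ]
      rw [h2]
      cases hrest : List.replicate n ([] : List Char) ++ [x] with
      | nil => simp at hrest
      | cons y ys =>
          rw [PySem.Chars.join_cons_cons, ← hrest, ih, List.replicate_succ]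
          simp

-- peeling k empty lines and one marked line out of a "\n"-join with a non-empty remainder
theorem joinNL_replicate_cons (k : Nat) (x : List Char) (rest : List (List Char)) (hr : rest ≠ []) :
    PySem.Chars.join ['\n'] (List.replicate k [] ++ x :: rest)
      = List.replicate k '\n' ++ x ++ '\n' :: PySem.Chars.join ['\n'] rest := by
  induction k with
  | zero =>
      cases rest with
      | nil => exact absurd rfl hr
      | cons r rs => simp [PySem.Chars.join_cons_cons]
  | succ n ih =>
      have h2 : List.replicate (n + 1) ([] : List Char) ++ x :: rest
          = [] :: (List.replicate n ([] : List Char) ++ x :: rest) := by simp [List.replicate_succ]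
      rw [h2]
      cases hrest : List.replicate n ([] : List Char) ++ x :: rest with
      | nil => simp at hrest
      | cons y ys =>
          rw [PySem.Chars.join_cons_cons, ← hrest, ih, List.replicate_succ]
          simp

-- A's dense block of lines over [p, l): all unmarked lines are ""
theorem map_lines_eq_replicate (S : List Int) (p l : Int)
    (h : ∀ i, p ≤ i → i < l → S.contains i = false) :
    ((PySem.List.pyRange p l 1).map
        (fun i => if S.contains i then covLine i else "")).map String.toList
      = List.replicate (l - p).toNat [] := by
  rw [List.eq_replicate_iff]
  constructor
  · simp [PySem.List.length_pyRange_one]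
  · intro b hb
    simp only [List.mem_map] at hb
    obtain ⟨s, ⟨i, hi, rfl⟩, rfl⟩ := hb
    obtain ⟨h1, h2⟩ := PySem.List.mem_pyRange_one.mp hi
    rw [h i h1 h2]
    rfl

-- moving the gap origin one line up moves one newline out of the first gap-run
theorem chunks_shift (l : Int) (t : List Int) (p : Int) (h : p < l) :
    PySem.Chars.join [] ((gapChunks (l :: t) p).map String.toList)
      = '\n' :: PySem.Chars.join [] ((gapChunks (l :: t) (p + 1)).map String.toList) := by
  have hk : (l - p).toNat = (l - (p + 1)).toNat + 1 := by omega
  simp only [gapChunks, List.map_cons, join_nil_cons, String.toList_ofList, hk,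
    List.replicate_succ]
  simp

-- main correspondence: A's "\n"-joined dense lines over [p, last L] equal B's gap chunks from prev = p
theorem dense_eq_chunks (S : List Int) :
    ∀ (L : List Int) (p : Int) (h : L ≠ []), L.Pairwise (· < ·) → (∀ x ∈ L, p ≤ x) →
      (∀ i, p ≤ i → (S.contains i = true ↔ i ∈ L)) →
      PySem.Chars.join ['\n']
          (((PySem.List.pyRange p (L.getLast h + 1) 1).map
              (fun i => if S.contains i then covLine i else "")).map String.toList)
        = PySem.Chars.join [] ((gapChunks L p).map String.toList) := by
  intro L
  induction L with
  | nil => intro p h; exact absurd rfl h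
  | cons l1 t ih =>
      intro p h hpw hge hmark
      have hl1p : p ≤ l1 := hge l1 (by simp)
      have hpref : ∀ i, p ≤ i → i < l1 → S.contains i = false := by
        intro i h1 h2
        by_contra hc
        have hc' : S.contains i = true := by
          cases hcc : S.contains i with
          | false => exact absurd hcc hc
          | true => rfl
        have hiL := (hmark i h1).mp hc'
        rcases List.mem_cons.mp hiL with rfl | hit
        · omega
        · have := (List.pairwise_cons.mp hpw).1 i hit; omega
      have hmeml1 : S.contains l1 = true := (hmark l1 hl1p).mpr (by simp)
      cases t with
      | nil =>
          -- single marked line: range [p, l1+1) = empties ++ [l1]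
          rw [List.getLast_singleton, PySem.List.pyRange_one_succ_right hl1p]
          simp only [List.map_append, List.map_cons, List.map_nil, hmeml1, if_pos]
          rw [map_lines_eq_replicate S p l1 hpref, joinNL_replicate_singleton]
          simp [gapChunks, join_nil_cons, String.toList_ofList]
      | cons l2 t' =>
          have hl12 : l1 < l2 := (List.pairwise_cons.mp hpw).1 l2 (by simp)
          have hm : l2 ≤ (l2 :: t').getLast (by simp) :=
            le_getLast_of_pairwise_lt _ (by simp) (List.pairwise_cons.mp hpw).2 l2 (by simp)
          rw [List.getLast_cons (by simp),
              PySem.List.pyRange_one_append p (l1 + 1) ((l2 :: t').getLast (by simp) + 1)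
                (by omega) (by omega),
              PySem.List.pyRange_one_succ_right hl1p]
          simp only [List.map_append, List.map_cons, hmeml1, if_pos,
            List.append_assoc, List.cons_append, List.nil_append]
          rw [map_lines_eq_replicate S p l1 hpref]
          have hrestne :
              (((PySem.List.pyRange (l1 + 1) ((l2 :: t').getLast (by simp) + 1) 1).map
                  (fun i => if S.contains i then covLine i else "")).map String.toList) ≠ [] := by
            simp only [ne_eq, List.map_eq_nil_iff]
            intro hnil
            have := congrArg List.length hnil
            simp [PySem.List.length_pyRange_one] at this
            omega
          rw [joinNL_replicate_cons _ _ _ hrestne]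
          have hih := ih (l1 + 1) (by simp) (List.pairwise_cons.mp hpw).2
            (fun x hx => by have := (List.pairwise_cons.mp hpw).1 x hx; omega)
            (by
              intro i hi
              rw [hmark i (by omega)]
              constructor
              · intro hiL
                rcases List.mem_cons.mp hiL with rfl | hit
                · omega
                · exact hit
              · intro hit; exact List.mem_cons_of_mem _ hit)
          rw [hih]
          conv_rhs => rw [gapChunks]
          simp only [List.map_cons]
          rw [join_nil_cons, join_nil_cons, chunks_shift l2 t' l1 hl12, String.toList_ofList]
          simp

-- ===== VERDICT (by name: the statement is the Claim_ definition above) =====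
theorem build_synthetic_source_py_spec : Claim_equal_build_synthetic_source_py := by
  intro S _
  unfold Spec_build_synthetic_source_py build_synthetic_source_py build_synthetic_source_py_alt
  by_cases hS0 : S = []
  · subst hS0; rfl
  set L := PySem.List.sorted (PySem.Set.ofList (S.filter (fun ln => decide (1 ≤ ln)))) (fun x => x) with hL
  have hmemL : ∀ i, i ∈ L ↔ i ∈ S ∧ 1 ≤ i := by
    intro i
    rw [hL, PySem.List.mem_sorted, PySem.Set.mem_ofList, List.mem_filter]
    simp
  have hpw : L.Pairwise (· < ·) := PySem.List.sorted_ofList_pairwise_lt _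
  have hS : S.isEmpty = false := by simp [hS0]
  simp only [hS, Bool.false_eq_true, if_false]
  · 
    cases hmax : PySem.List.max? S (fun x => x) with
    | none => exact absurd (List.isEmpty_iff.mpr ((PySem.List.max?_eq_none_iff _ _).mp hmax)) (by simp [hS])
    | some m =>
        simp only []
        have hmS : m ∈ S := PySem.List.max?_mem hmax
        have hmax' : ∀ y ∈ S, y ≤ m := PySem.List.max?_isMax hmax
        rw [PySem.List.foldl_append_singleton_eq_map, List.nil_append]
        apply String.toList_inj.mp
        rw [PySem.Str.toList_join, PySem.Str.toList_join]
        by_cases hm1 : 1 ≤ m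
        · -- the maximum is a marked line and is the last element of L
          have hmL : m ∈ L := (hmemL m).mpr ⟨hmS, hm1⟩
          have hne : L ≠ [] := by intro hnil; rw [hnil] at hmL; exact absurd hmL (by simp)
          have hlast : L.getLast hne = m := by
            have h1 : L.getLast hne ≤ m := hmax' _ ((hmemL _).mp (List.getLast_mem hne)).1
            have h2 : m ≤ L.getLast hne := le_getLast_of_pairwise_lt L hne hpw m hmL
            omega
          have := dense_eq_chunks S L 1 hne hpw
            (fun x hx => ((hmemL x).mp hx).2)
            (fun i hi => by
              rw [hmemL i]
              constructor
              · intro hc; exact ⟨(List.contains_iff_mem).mp hc, hi⟩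
              · intro ⟨h1, _⟩; exact (List.contains_iff_mem).mpr h1)
          rw [hlast] at this
          exact this
        · -- every element is ≤ 0: no lines at all on either side
          have hrange : PySem.List.pyRange 1 (m + 1) 1 = [] :=
            PySem.List.pyRange_one_eq_nil (by omega)
          have hLnil : L = [] := by
            rw [List.eq_nil_iff_forall_not_mem]
            intro x hx
            have := (hmemL x).mp hx
            have := hmax' x this.1
            omega
          rw [hrange, hLnil]
          simp [gapChunks, PySem.Chars.join_nil]
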